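-- pv_equiv track=rewrite | github.com/ClanClanClanClan/math-pdf-manager | .archive/legacy/consolidated/validators_legacy/math_utils.py | iterate_nonmath_segments
-- ===== SOURCE A (Python) =====
-- from typing import List, Tuple, Set
--
-- def iterate_nonmath_segments(text: str, regions: List[Tuple[int, int]]):
--     """
--     Iterate over non-mathematical segments of text.
--
--     Args:
--         text: Input text
--         regions: List of (start, end) tuples for math regions
--
--     Yields:
--         Tuples of (start, end, segment) for non-math segments
--     """
--     if not regions:
--         yield 0, len(text), text
--         return
--
--     # Sort regions by start position
--     sorted_regions = sorted(regions)
--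
--     pos = 0
--     for start, end in sorted_regions:
--         if pos < start:
--             # Yield segment before math region
--             yield pos, start, text[pos:start]
--         pos = max(pos, end)
--
--     # Yield remaining segment after last math region
--     if pos < len(text):
--         yield pos, len(text), text[pos:]
-- ===== SOURCE B (Python) =====
-- def iterate_nonmath_segments(text, regions):
--     """Two-phase rewrite: first coalesce the sorted regions into merged
--     covered intervals, then emit the complementary gaps."""
--     if not regions:
--         yield 0, len(text), text
--         return
--     # Phase 1: build merged covered intervals (seeded with the degenerate [0,0)).
--     merged = []
--     cur_s, cur_e = 0, 0
--     for s, e in sorted(regions):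
--         if s > cur_e:
--             merged.append((cur_s, cur_e))
--             cur_s = s
--         cur_e = max(cur_e, e)
--     merged.append((cur_s, cur_e))
--     # Phase 2: emit each gap between consecutive covered intervals, then the tail.
--     prev_end = 0
--     for s, e in merged:
--         if prev_end < s:
--             yield prev_end, s, text[prev_end:s]
--         prev_end = e
--     if prev_end < len(text):
--         yield prev_end, len(text), text[prev_end:]
-- ===== Notes on version B (the rewrite author's own statement) =====
-- stated objective: alternative
-- what changed: A interleaves gap emission with a running max over the sorted regions in one fold; B first coalesces the sorted regions into an explicit list of merged covered intervals and then, in a second pass, emits the complementary gap before each merged interval plus the tail.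
import Mathlib
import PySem

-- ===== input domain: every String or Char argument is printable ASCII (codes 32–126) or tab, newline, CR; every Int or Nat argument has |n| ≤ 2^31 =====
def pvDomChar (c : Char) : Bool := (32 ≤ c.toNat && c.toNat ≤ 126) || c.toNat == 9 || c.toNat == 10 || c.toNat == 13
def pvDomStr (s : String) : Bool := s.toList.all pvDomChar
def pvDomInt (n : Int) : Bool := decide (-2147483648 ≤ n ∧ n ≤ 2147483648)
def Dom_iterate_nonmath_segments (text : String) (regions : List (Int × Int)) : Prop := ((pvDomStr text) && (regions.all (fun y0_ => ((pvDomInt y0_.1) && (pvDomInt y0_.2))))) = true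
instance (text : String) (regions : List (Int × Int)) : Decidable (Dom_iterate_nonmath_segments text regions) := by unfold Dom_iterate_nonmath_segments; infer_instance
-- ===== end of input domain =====

-- B restructures A's single gap-emitting fold into two passes: first coalesce the
-- sorted regions into merged covered intervals, then emit the complementary gaps
-- (objective: alternative decomposition; same cost). Return value only (A is a generator).

-- ===== PORT A =====
def iterate_nonmath_segments (text : String) (regions : List (Int × Int)) : List (Int × Int × String) :=
  if regions = [] then [(0, PySem.Str.len text, text)]
  else
    let sorted_regions := PySem.List.sorted2 regions (fun r => r.1) (fun r => r.2)
    let st := sorted_regions.foldl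
      (fun (st : Int × List (Int × Int × String)) (r : Int × Int) =>
        let acc := if st.1 < r.1 then
            st.2 ++ [(st.1, r.1, PySem.Str.slice text (some st.1) (some r.1))]
          else st.2
        (max st.1 r.2, acc)) (0, [])
    if st.1 < PySem.Str.len text then
      st.2 ++ [(st.1, PySem.Str.len text, PySem.Str.slice text (some st.1) none)]
    else st.2

-- ===== PORT B =====
-- Phase 1 of Source B: fold coalescing regions into merged covered intervals.
def pvMergeStep (st : Int × Int × List (Int × Int)) (r : Int × Int) : Int × Int × List (Int × Int) :=
  if r.1 > st.2.1 then (r.1, max st.2.1 r.2, st.2.2 ++ [(st.1, st.2.1)])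
  else (st.1, max st.2.1 r.2, st.2.2)

-- Phase 2 of Source B: fold emitting the gap before each merged interval.
def pvEmitStep (text : String) (st : Int × List (Int × Int × String)) (r : Int × Int) : Int × List (Int × Int × String) :=
  (r.2, if st.1 < r.1 then
      st.2 ++ [(st.1, r.1, PySem.Str.slice text (some st.1) (some r.1))]
    else st.2)

def iterate_nonmath_segments_alt (text : String) (regions : List (Int × Int)) : List (Int × Int × String) :=
  if regions = [] then [(0, PySem.Str.len text, text)]
  else
    let m := (PySem.List.sorted2 regions (fun r => r.1) (fun r => r.2)).foldl pvMergeStep (0, 0, [])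
    let merged := m.2.2 ++ [(m.1, m.2.1)]
    let g := merged.foldl (pvEmitStep text) (0, [])
    if g.1 < PySem.Str.len text then
      g.2 ++ [(g.1, PySem.Str.len text, PySem.Str.slice text (some g.1) none)]
    else g.2

-- ===== PRECONDITION & SPEC =====
def Spec_iterate_nonmath_segments (text : String) (regions : List (Int × Int)) (out : List (Int × Int × String)) : Prop := out = iterate_nonmath_segments_alt text regions
instance (text : String) (regions : List (Int × Int)) (out : List (Int × Int × String)) : Decidable (Spec_iterate_nonmath_segments text regions out) := by unfold Spec_iterate_nonmath_segments; infer_instance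

-- ===== CLAIM (what is proved, stated in full; the proofs are below) =====
def Claim_equal_iterate_nonmath_segments : Prop := ∀ (text : String) (regions : List (Int × Int)), Dom_iterate_nonmath_segments text regions → Spec_iterate_nonmath_segments text regions (iterate_nonmath_segments text regions)

-- ===== LEMMAS AND PROOFS =====

-- Emitting over a merged list ending in (cs, ce): final position is ce, and the
-- accumulated output depends on the earlier intervals and cs only.
theorem pvEmit_append_last (text : String) (m : List (Int × Int)) (cs ce : Int) :
    (m ++ [(cs, ce)]).foldl (pvEmitStep text) (0, []) =
      (ce, (m.foldl (pvEmitStep text) (0, [])).2 ++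
        (if (m.foldl (pvEmitStep text) (0, [])).1 < cs then
          [((m.foldl (pvEmitStep text) (0, [])).1, cs,
            PySem.Str.slice text (some (m.foldl (pvEmitStep text) (0, [])).1) (some cs))]
        else [])) := by
  rw [List.foldl_append]
  simp only [List.foldl_cons, List.foldl_nil, pvEmitStep]
  split_ifs <;> simp

-- Core invariant: running B's merge fold from state (cs, ce, m) and then emitting
-- equals running A's fold from the state obtained by emitting over m ++ [(cs, ce)].
theorem pvLoop_equiv (text : String) (rs : List (Int × Int)) :
    ∀ (cs ce : Int) (m : List (Int × Int)),
    (let mm := rs.foldl pvMergeStep (cs, ce, m);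
      (mm.2.2 ++ [(mm.1, mm.2.1)]).foldl (pvEmitStep text) (0, []))
    = rs.foldl
        (fun (st : Int × List (Int × Int × String)) (r : Int × Int) =>
          let acc := if st.1 < r.1 then
              st.2 ++ [(st.1, r.1, PySem.Str.slice text (some st.1) (some r.1))]
            else st.2
          (max st.1 r.2, acc))
        ((m ++ [(cs, ce)]).foldl (pvEmitStep text) (0, [])) := by
  induction rs with
  | nil => intro cs ce m; rfl
  | cons r rs ih =>
    intro cs ce m
    simp only [List.foldl_cons]
    by_cases h : ce < r.1
    · rw [show pvMergeStep (cs, ce, m) r = (r.1, max ce r.2, m ++ [(cs, ce)]) by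
        simp [pvMergeStep, h]]
      rw [ih r.1 (max ce r.2) (m ++ [(cs, ce)])]
      congr 1
      rw [pvEmit_append_last, pvEmit_append_last text m cs ce]
      simp [h]
    · rw [show pvMergeStep (cs, ce, m) r = (cs, max ce r.2, m) by
        simp [pvMergeStep]; omega]
      rw [ih cs (max ce r.2) m]
      congr 1
      rw [pvEmit_append_last, pvEmit_append_last text m cs ce]
      simp [h]

-- ===== VERDICT (by name: the statement is the Claim_ definition above) =====
theorem iterate_nonmath_segments_spec : Claim_equal_iterate_nonmath_segments := by
  intro text regions _
  show iterate_nonmath_segments text regions = iterate_nonmath_segments_alt text regions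
  unfold iterate_nonmath_segments iterate_nonmath_segments_alt
  by_cases h : regions = []
  · simp [h]
  · simp only [h, if_false]
    have := pvLoop_equiv text (PySem.List.sorted2 regions (fun r => r.1) (fun r => r.2)) 0 0 []
    simp only [List.nil_append] at this
    have h0 : List.foldl (pvEmitStep text) (0, ([] : List (Int × Int × String))) [((0:Int),(0:Int))] = (0, []) := by
      simp [pvEmitStep]
    rw [h0] at this
    rw [this]
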